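-- pv_equiv track=rewrite | github.com/ewelchman/football_analytics | weekly_update/espn_parseplays.py | found_pass
-- ===== SOURCE A (Python) =====
-- def found_pass(detail):
--     d = detail.lower()
--     pass_terms = [" pass", " sacked", " scramble",
--                   "interception", "intercepted"]
--     for term in pass_terms:
--         if term in d:
--             return True
--     return False
-- ===== SOURCE B (Python) =====
-- import re
--
-- _PASS_RE = re.compile(r" pass| sacked| scramble|interception|intercepted")
--
-- def found_pass(detail):
--     return _PASS_RE.search(detail.lower()) is not None
-- ===== Notes on version B (the rewrite author's own statement) =====
-- stated objective: idiomatic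
-- what changed: Replaces the explicit loop over a term list with five substring searches by a single precompiled regex alternation scanned once over the lowercased string, coerced to bool.
import Mathlib
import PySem

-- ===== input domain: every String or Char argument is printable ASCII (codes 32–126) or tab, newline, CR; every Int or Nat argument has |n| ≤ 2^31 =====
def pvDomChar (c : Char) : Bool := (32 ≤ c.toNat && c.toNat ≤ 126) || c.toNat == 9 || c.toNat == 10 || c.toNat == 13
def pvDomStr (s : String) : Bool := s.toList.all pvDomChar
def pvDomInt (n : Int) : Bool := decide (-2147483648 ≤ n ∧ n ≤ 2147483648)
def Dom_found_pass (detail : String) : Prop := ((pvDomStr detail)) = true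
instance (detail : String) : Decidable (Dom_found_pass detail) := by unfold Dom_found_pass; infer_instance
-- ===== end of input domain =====

-- B replaces A's loop over a term list (five separate substring searches) by a single
-- regex-alternation scan over the lowercased string (idiomatic; same exact results).


-- ===== PORT A =====
-- the 'for term in pass_terms: if term in d: return True' loop
def fpLoopA (terms : List String) (d : String) : Bool :=
  match terms with
  | [] => false
  | t :: rest => if PySem.Str.isIn t d then true else fpLoopA rest d

def found_pass (detail : String) : Bool :=
  let d := PySem.Str.lower detail
  let pass_terms : List String := [" pass", " sacked", " scramble", "interception", "intercepted"]
  fpLoopA pass_terms d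

-- ===== PORT B =====
-- re.search on the literal alternation r" pass| sacked| scramble|interception|intercepted":
-- ported by hand as a single left-to-right scan that at each position tests the five
-- alternatives as prefixes — exact for this literal (anchor-free, backreference-free) pattern.
def fpAltHit (s : List Char) : Bool :=
  PySem.Chars.startswith s " pass".toList ||
  PySem.Chars.startswith s " sacked".toList ||
  PySem.Chars.startswith s " scramble".toList ||
  PySem.Chars.startswith s "interception".toList ||
  PySem.Chars.startswith s "intercepted".toList

def fpScan : List Char → Bool
  | [] => false
  | c :: rest => fpAltHit (c :: rest) || fpScan rest

def found_pass_alt (detail : String) : Bool :=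
  fpScan (PySem.Chars.lower detail.toList)

-- ===== PRECONDITION & SPEC =====
def Spec_found_pass (detail : String) (out : Bool) : Prop := out = found_pass_alt detail
instance (detail : String) (out : Bool) : Decidable (Spec_found_pass detail out) := by unfold Spec_found_pass; infer_instance

-- ===== CLAIM (what is proved, stated in full; the proofs are below) =====
def Claim_equal_found_pass : Prop := ∀ (detail : String), Dom_found_pass detail → Spec_found_pass detail (found_pass detail)

-- ===== LEMMAS AND PROOFS =====

theorem fpScan_eq_true_iff (l : List Char) :
    fpScan l = true ↔ ∃ j, fpAltHit (l.drop j) = true := by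
  induction l with
  | nil =>
    simp only [fpScan, List.drop_nil]
    constructor
    · intro h; exact absurd h (by decide)
    · rintro ⟨j, hj⟩; exact absurd hj (by decide)
  | cons c rest ih =>
    simp only [fpScan, Bool.or_eq_true, ih]
    constructor
    · rintro (h | ⟨j, hj⟩)
      · exact ⟨0, h⟩
      · exact ⟨j + 1, by simpa using hj⟩
    · rintro ⟨j, hj⟩
      cases j with
      | zero => exact Or.inl (by simpa using hj)
      | succ k => exact Or.inr ⟨k, by simpa using hj⟩

theorem fpAltHit_iff (s : List Char) :
    fpAltHit s = true ↔
      (" pass".toList <+: s ∨ " sacked".toList <+: s ∨ " scramble".toList <+: s ∨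
       "interception".toList <+: s ∨ "intercepted".toList <+: s) := by
  simp [fpAltHit, PySem.Chars.startswith_iff, or_assoc]

theorem found_pass_alt_iff (detail : String) :
    found_pass_alt detail = true ↔
      (PySem.Chars.isIn " pass".toList (PySem.Chars.lower detail.toList) = true ∨
       PySem.Chars.isIn " sacked".toList (PySem.Chars.lower detail.toList) = true ∨
       PySem.Chars.isIn " scramble".toList (PySem.Chars.lower detail.toList) = true ∨
       PySem.Chars.isIn "interception".toList (PySem.Chars.lower detail.toList) = true ∨
       PySem.Chars.isIn "intercepted".toList (PySem.Chars.lower detail.toList) = true) := by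
  simp only [found_pass_alt, fpScan_eq_true_iff, fpAltHit_iff,
    ← PySem.Chars.exists_prefix_drop_iff_isIn]
  aesop

theorem found_pass_iff (detail : String) :
    found_pass detail = true ↔
      (PySem.Chars.isIn " pass".toList (PySem.Chars.lower detail.toList) = true ∨
       PySem.Chars.isIn " sacked".toList (PySem.Chars.lower detail.toList) = true ∨
       PySem.Chars.isIn " scramble".toList (PySem.Chars.lower detail.toList) = true ∨
       PySem.Chars.isIn "interception".toList (PySem.Chars.lower detail.toList) = true ∨
       PySem.Chars.isIn "intercepted".toList (PySem.Chars.lower detail.toList) = true) := by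
  simp only [found_pass, fpLoopA]
  split_ifs with h1 h2 h3 h4 h5 <;>
    simp_all [PySem.Str.isIn, PySem.Str.lower]

-- ===== VERDICT (by name: the statement is the Claim_ definition above) =====
theorem found_pass_spec : Claim_equal_found_pass := by
  intro detail _
  unfold Spec_found_pass
  rw [Bool.eq_iff_iff, found_pass_iff, found_pass_alt_iff]
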